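-- pv_equiv track=rewrite | github.com/YimingLin19/pyfem-v2-update | src/pyfem/post/common.py | _normalize_measure_map
-- ===== SOURCE A (Python) =====
-- from collections.abc import Mapping, Sequence
--
-- MEASURE_VALUE_UNSPECIFIED = "unspecified"
--
-- def normalize_measure_value(value: str | None) -> str:
--     """规范化单个测度标签。"""
--
--     if value is None:
--         return MEASURE_VALUE_UNSPECIFIED
--     normalized_value = str(value).strip()
--     if not normalized_value:
--         return MEASURE_VALUE_UNSPECIFIED
--     return normalized_value
--
-- def _normalize_measure_map(
--     measures: Mapping[str, str] | None,
--     target_keys: Sequence[str],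
-- ) -> dict[str, str]:
--     if not measures:
--         return {}
--     target_key_set = {str(target_key) for target_key in target_keys}
--     return {
--         str(target_key): normalize_measure_value(value)
--         for target_key, value in measures.items()
--         if str(target_key) in target_key_set
--     }
-- ===== SOURCE B (Python) =====
-- # B: membership via a sorted unique key array + hand-written binary search,
-- # explicit accumulator loop instead of set + dict comprehension.
-- MEASURE_VALUE_UNSPECIFIED = "unspecified"
--
--
-- def _sorted_contains(keys, key):
--     lo, hi = 0, len(keys)
--     while lo < hi:
--         mid = (lo + hi) // 2
--         if keys[mid] < key:
--             lo = mid + 1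
--         else:
--             hi = mid
--     return lo < len(keys) and keys[lo] == key
--
--
-- def _normalize_measure_map(measures, target_keys):
--     if not measures:
--         return {}
--     wanted = sorted({str(tk) for tk in target_keys})
--     result = {}
--     for key, value in measures.items():
--         k = str(key)
--         if _sorted_contains(wanted, k):
--             nv = "" if value is None else str(value).strip()
--             result[k] = nv or MEASURE_VALUE_UNSPECIFIED
--     return result
-- ===== Notes on version B (the rewrite author's own statement) =====
-- stated objective: alternative
-- what changed: Replaces the target-key hash set and dict comprehension with a sorted unique key array queried by a hand-written binary search inside an explicit accumulator loop.
import Mathlib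
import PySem

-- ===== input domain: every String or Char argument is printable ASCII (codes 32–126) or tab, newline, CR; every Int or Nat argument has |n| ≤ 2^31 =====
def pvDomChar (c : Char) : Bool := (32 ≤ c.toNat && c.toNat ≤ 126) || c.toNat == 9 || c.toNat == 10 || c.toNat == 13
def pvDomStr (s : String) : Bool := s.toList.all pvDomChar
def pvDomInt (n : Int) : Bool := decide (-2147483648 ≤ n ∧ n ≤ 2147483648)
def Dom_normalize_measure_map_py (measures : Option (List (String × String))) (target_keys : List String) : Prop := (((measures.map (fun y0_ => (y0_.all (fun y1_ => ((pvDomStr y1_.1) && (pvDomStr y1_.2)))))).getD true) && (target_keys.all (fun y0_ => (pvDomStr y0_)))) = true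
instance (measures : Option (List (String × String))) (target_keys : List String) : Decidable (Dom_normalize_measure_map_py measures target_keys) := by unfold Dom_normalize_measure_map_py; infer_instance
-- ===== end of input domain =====

-- B replaces A's target-key set + dict comprehension with a sorted unique key array
-- queried by binary search in an explicit accumulator loop (objective: alternative).

-- ===== PORT A =====
-- str.strip() / falsy-string test, exact via PySem.Str.strip
def normalize_measure_value_py (value : String) : String :=
  let normalized_value := PySem.Str.strip value
  if normalized_value = "" then "unspecified" else normalized_value

def normalize_measure_map_py (measures : Option (List (String × String))) (target_keys : List String) : List (String × String) :=
  match measures with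
  | none => []
  | some m =>
    if m = [] then []
    else
      let target_key_set : PySem.Set String := PySem.Set.ofList target_keys
      (m.foldl (fun d kv =>
        if PySem.Set.contains target_key_set kv.1 then
          d.insert kv.1 (normalize_measure_value_py kv.2)
        else d) PySem.Dict.empty).items

-- ===== PORT B =====
-- the while-loop of _sorted_contains, recursion on hi - lo
def sortedContainsGo (keys : List String) (key : String) (lo hi : Nat) : Bool :=
  if _h : lo < hi then
    let mid := (lo + hi) / 2
    if keys.getD mid "" < key then sortedContainsGo keys key (mid + 1) hi
    else sortedContainsGo keys key lo mid
  else
    decide (lo < keys.length) && (keys.getD lo "" == key)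
termination_by hi - lo
decreasing_by all_goals omega

def sortedContains (keys : List String) (key : String) : Bool :=
  sortedContainsGo keys key 0 keys.length

def normalize_measure_map_py_alt (measures : Option (List (String × String))) (target_keys : List String) : List (String × String) :=
  match measures with
  | none => []
  | some m =>
    if m = [] then []
    else
      let wanted := PySem.List.sorted (PySem.Set.ofList target_keys) (fun x => x) false
      (m.foldl (fun d kv =>
        if sortedContains wanted kv.1 then
          let nv := PySem.Str.strip kv.2
          d.insert kv.1 (if nv = "" then "unspecified" else nv)
        else d) PySem.Dict.empty).items

-- ===== PRECONDITION & SPEC =====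
def Spec_normalize_measure_map_py (measures : Option (List (String × String))) (target_keys : List String) (out : List (String × String)) : Prop := out = normalize_measure_map_py_alt measures target_keys
instance (measures : Option (List (String × String))) (target_keys : List String) (out : List (String × String)) : Decidable (Spec_normalize_measure_map_py measures target_keys out) := by unfold Spec_normalize_measure_map_py; infer_instance

-- ===== CLAIM (what is proved, stated in full; the proofs are below) =====
def Claim_equal_normalize_measure_map_py : Prop := ∀ (measures : Option (List (String × String))) (target_keys : List String), Dom_normalize_measure_map_py measures target_keys → Spec_normalize_measure_map_py measures target_keys (normalize_measure_map_py measures target_keys)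

-- ===== LEMMAS AND PROOFS =====

-- binary-search invariant: on a strictly sorted list, the loop decides membership
lemma sortedContainsGo_correct (keys : List String) (key : String)
    (hs : keys.Pairwise (· < ·)) :
    ∀ n lo hi, hi - lo ≤ n → lo ≤ hi → hi ≤ keys.length →
    (∀ i (h : i < keys.length), i < lo → keys[i] < key) →
    (∀ i (h : i < keys.length), hi ≤ i → ¬ keys[i] < key) →
    (sortedContainsGo keys key lo hi = true ↔ key ∈ keys) := by
  intro n
  induction n with
  | zero =>
    intro lo hi hn hlohi hhi inv1 inv2
    have hlo : lo = hi := by omega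
    rw [sortedContainsGo]
    simp only [show ¬ lo < hi by omega, dif_neg, not_false_iff]
    constructor
    · intro hIf
      rw [Bool.and_eq_true, decide_eq_true_eq, beq_iff_eq] at hIf
      obtain ⟨hlt, heq⟩ := hIf
      rw [List.getD_eq_getElem keys "" hlt] at heq
      exact heq ▸ List.getElem_mem hlt
    · intro hmem
      obtain ⟨j, hj, hjeq⟩ := List.mem_iff_getElem.mp hmem
      have hjlo : lo ≤ j := by
        by_contra hc
        have := inv1 j hj (by omega)
        rw [hjeq] at this
        exact lt_irrefl _ this
      have hlolen : lo < keys.length := by omega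
      have hkeylo : keys[lo] = key := by
        rcases Nat.lt_or_ge lo j with hlt | hge
        · have h1 : keys[lo] < keys[j] := List.pairwise_iff_getElem.mp hs lo j hlolen hj hlt
          have h2 := inv2 lo hlolen (le_of_eq hlo.symm)
          rw [hjeq] at h1
          exact absurd h1 h2
        · have : j = lo := by omega
          subst this; exact hjeq
      rw [Bool.and_eq_true, decide_eq_true_eq, beq_iff_eq]
      exact ⟨hlolen, by rw [List.getD_eq_getElem keys "" hlolen]; exact hkeylo⟩
  | succ n ih =>
    intro lo hi hn hlohi hhi inv1 inv2
    by_cases h : lo < hi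
    · rw [sortedContainsGo]
      simp only [h, dif_pos]
      have hmidlt : (lo + hi) / 2 < hi := by omega
      have hmidge : lo ≤ (lo + hi) / 2 := by omega
      have hmidlen : (lo + hi) / 2 < keys.length := by omega
      rw [List.getD_eq_getElem keys "" hmidlen]
      by_cases hcmp : keys[(lo + hi) / 2] < key
      · simp only [hcmp, if_pos]
        refine ih ((lo+hi)/2+1) hi (by omega) (by omega) hhi ?_ inv2
        intro i hilen hiltm
        rcases Nat.lt_or_ge i ((lo+hi)/2) with hlt | hge
        · exact lt_trans (List.pairwise_iff_getElem.mp hs i ((lo+hi)/2) hilen hmidlen hlt) hcmp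
        · have : i = (lo+hi)/2 := by omega
          subst this; exact hcmp
      · simp only [hcmp, if_false]
        refine ih lo ((lo+hi)/2) (by omega) hmidge (by omega) inv1 ?_
        intro i hilen hge
        rcases Nat.lt_or_ge ((lo+hi)/2) i with hlt | hge2
        · intro habs
          exact hcmp (lt_trans (List.pairwise_iff_getElem.mp hs ((lo+hi)/2) i hmidlen hilen hlt) habs)
        · have : i = (lo+hi)/2 := by omega
          subst this; exact hcmp
    · exact ih lo hi (by omega) hlohi hhi inv1 inv2

-- the two membership tests agree on every key
lemma contains_eq_sortedContains (target_keys : List String) (k : String) :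
    PySem.Set.contains (PySem.Set.ofList target_keys) k =
      sortedContains (PySem.List.sorted (PySem.Set.ofList target_keys) (fun x => x) false) k := by
  have hs : (PySem.List.sorted (PySem.Set.ofList target_keys) (fun x => x) false).Pairwise (· < ·) :=
    PySem.List.sorted_ofList_pairwise_lt target_keys
  have hbs := sortedContainsGo_correct _ k hs _ 0 _ (le_refl _) (Nat.zero_le _) (le_refl _)
    (by intro i h hi; omega) (by intro i h hge; omega)
  have hmem : (sortedContains (PySem.List.sorted (PySem.Set.ofList target_keys) (fun x => x) false) k = true)
      ↔ k ∈ PySem.Set.ofList target_keys := by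
    rw [sortedContains, hbs, PySem.List.mem_sorted]
  have hset : (PySem.Set.contains (PySem.Set.ofList target_keys) k = true) ↔ k ∈ PySem.Set.ofList target_keys := by
    simp [PySem.Set.contains]
  rw [Bool.eq_iff_iff, hset, hmem]

-- ===== VERDICT (by name: the statement is the Claim_ definition above) =====
theorem normalize_measure_map_py_spec : Claim_equal_normalize_measure_map_py := by
  intro measures target_keys _
  unfold Spec_normalize_measure_map_py normalize_measure_map_py normalize_measure_map_py_alt
  cases measures with
  | none => rfl
  | some m =>
    simp only
    by_cases hm : m = []
    · simp [hm]
    · simp only [hm, if_false]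
      congr 1
      apply PySem.List.foldl_congr_mem
      intro d kv _
      rw [contains_eq_sortedContains target_keys kv.1]
      simp [normalize_measure_value_py]
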